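-- pv_equiv track=rewrite | github.com/Sam21sop/Coding_Ninjas_DSA_With_Python | Milestone01_Introduction_To_Python/07_Operators&ForLoop/SumOrProduct.py | sumOrProduct
-- ===== SOURCE A (Python) =====
-- def sumOrProduct(n, c):
--     '''
--     n: number by user defined
--     c: user choice
--     '''
--     s = 0
--     p = 1
--     for num in range(1, n+1):
--         s += num
--         p *= num
--
--     if c == 1:
--         return s
--     elif c == 2:
--         return p
--     else:
--         return -1
-- ===== SOURCE B (Python) =====
-- def sumOrProduct(n, c):
--     if c == 1:
--         return n * (n + 1) // 2 if n > 0 else 0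
--     elif c == 2:
--         return fact(n)
--     else:
--         return -1
--
-- def fact(n):
--     return 1 if n <= 1 else n * fact(n - 1)
-- ===== Notes on version B (the rewrite author's own statement) =====
-- stated objective: faster
-- what changed: Branch on the choice c first: the sum is the closed form n*(n+1)//2 (0 for n<=0) instead of a loop, and the product is a small recursive factorial, replacing A's eager dual-accumulator loop that always computes both sum and product.
import Mathlib
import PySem

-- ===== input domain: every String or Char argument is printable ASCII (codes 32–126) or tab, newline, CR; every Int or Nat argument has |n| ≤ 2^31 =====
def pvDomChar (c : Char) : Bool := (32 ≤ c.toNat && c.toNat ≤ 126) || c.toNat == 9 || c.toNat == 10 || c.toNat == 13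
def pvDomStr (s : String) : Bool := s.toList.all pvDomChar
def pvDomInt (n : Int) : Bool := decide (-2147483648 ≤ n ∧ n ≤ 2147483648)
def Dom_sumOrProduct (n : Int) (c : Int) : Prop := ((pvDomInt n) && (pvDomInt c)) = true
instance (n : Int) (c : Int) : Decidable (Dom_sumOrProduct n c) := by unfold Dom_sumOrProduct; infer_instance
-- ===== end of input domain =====

-- B branches on the choice c first: the sum uses the closed form n*(n+1)//2 (0 for n ≤ 0)
-- and the product is a recursive factorial, instead of A's eager dual-accumulator loop. (objective: simpler)

-- ===== PORT A =====
def sumOrProduct (n : Int) (c : Int) : Int :=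
  let s : Int := 0
  let p : Int := 1
  let sp := (PySem.List.pyRange 1 (n + 1) 1).foldl
    (fun (st : Int × Int) num => (st.1 + num, st.2 * num)) (s, p)
  if c = 1 then sp.1
  else if c = 2 then sp.2
  else -1

-- ===== PORT B =====
-- recursive factorial: fact(n) = 1 if n <= 1 else n * fact(n-1)
def sopFact (n : Int) : Int :=
  if n ≤ 1 then 1 else n * sopFact (n - 1)
termination_by n.toNat
decreasing_by omega

def sumOrProduct_alt (n : Int) (c : Int) : Int :=
  if c = 1 then (if n > 0 then PySem.Int.floordiv (n * (n + 1)) 2 else 0)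
  else if c = 2 then sopFact n
  else -1

-- ===== PRECONDITION & SPEC =====
def Spec_sumOrProduct (n : Int) (c : Int) (out : Int) : Prop := out = sumOrProduct_alt n c
instance (n : Int) (c : Int) (out : Int) : Decidable (Spec_sumOrProduct n c out) := by unfold Spec_sumOrProduct; infer_instance

-- ===== CLAIM (what is proved, stated in full; the proofs are below) =====
def Claim_equal_sumOrProduct : Prop := ∀ (n : Int) (c : Int), Dom_sumOrProduct n c → Spec_sumOrProduct n c (sumOrProduct n c)

-- ===== LEMMAS AND PROOFS =====

-- A's loop over range(1, n+1) computes (1+…+n, n!) = (n*(n+1)/2, sopFact n) for 0 ≤ n.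
theorem sop_loop_eq (m : Nat) :
    (PySem.List.pyRange 1 ((m : Int) + 1) 1).foldl
      (fun (st : Int × Int) num => (st.1 + num, st.2 * num)) (0, 1)
    = ((m : Int) * (m + 1) / 2, sopFact m) := by
  induction m with
  | zero =>
    simp [PySem.List.pyRange_one_eq_nil, sopFact]
  | succ k ih =>
    have h : PySem.List.pyRange 1 ((k : Int) + 1 + 1) 1
        = PySem.List.pyRange 1 ((k : Int) + 1) 1 ++ [(k : Int) + 1] := by
      exact_mod_cast PySem.List.pyRange_one_succ_right (a := 1) (b := (k : Int) + 1) (by omega)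
    push_cast
    rw [show ((k : Int) + 1 + 1) = ((k : Int) + 1) + 1 from rfl, h, List.foldl_append, ih]
    simp only [List.foldl_cons, List.foldl_nil, Prod.mk.injEq]
    constructor
    · rw [show ((k : Int) + 1) * ((k : Int) + 1 + 1)
            = (k : Int) * ((k : Int) + 1) + ((k : Int) + 1) * 2 by ring,
          Int.add_mul_ediv_right _ _ (by norm_num : (2 : Int) ≠ 0)]
    · by_cases hk : k = 0
      · subst hk; simp [sopFact]
      · conv_rhs => rw [sopFact]
        rw [if_neg (by omega : ¬ ((k : Int) + 1 ≤ 1)),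
            show ((k : Int) + 1 - 1) = (k : Int) by ring]
        ring

theorem sopFact_nonpos (n : Int) (h : n ≤ 0) : sopFact n = 1 := by
  rw [sopFact, if_pos (by omega)]

-- ===== VERDICT (by name: the statement is the Claim_ definition above) =====
theorem sumOrProduct_spec : Claim_equal_sumOrProduct := by
  intro n c _
  unfold Spec_sumOrProduct sumOrProduct sumOrProduct_alt
  by_cases hn : 0 ≤ n
  · obtain ⟨m, rfl⟩ := Int.eq_ofNat_of_zero_le hn
    simp only [sop_loop_eq]
    by_cases hc1 : c = 1
    · simp only [hc1, ite_true]
      by_cases hm : (m : Int) > 0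
      · rw [if_pos hm, PySem.Int.floordiv_eq_ediv_of_pos (by omega)]
      · have hm0 : (m : Int) = 0 := by omega
        rw [if_neg hm, hm0]; simp
    · simp [hc1]
  · have hr : PySem.List.pyRange 1 (n + 1) 1 = [] :=
      PySem.List.pyRange_one_eq_nil (a := 1) (b := n + 1) (by omega)
    rw [hr]
    simp only [List.foldl_nil]
    by_cases hc1 : c = 1
    · simp [hc1, show ¬ n > 0 by omega]
    · by_cases hc2 : c = 2
      · simp [hc2, sopFact_nonpos n (by omega)]
      · simp [hc1, hc2]
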